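-- pv_equiv track=rewrite | github.com/fizbin/4michael | hekatonkheire/hekascore.py | _check_multi3oak
-- ===== SOURCE A (Python) =====
-- import collections
--
-- def _check_multi3oak(hand):
--     ranks = collections.Counter(x[0] for x in hand)
--     n_jokers = ranks['O']
--     del ranks['O']
--     most_common = ranks.most_common()
--     n_triples = len([nom for (nom, count) in most_common if count == 3])
--     n_pairs = len([nom for (nom, count) in most_common if count == 2])
--     n_singletons = len([nom for (nom, count) in most_common if count == 1])
--     joker_triples_from_pairs = min(n_pairs, n_jokers)
--     n_jokers -= joker_triples_from_pairs
--     joker_triples_from_singletons = min(n_singletons, n_jokers // 2)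
--     n_jokers -= 2*joker_triples_from_singletons
--     n_triples += joker_triples_from_pairs
--     n_triples += joker_triples_from_singletons
--     n_triples += n_jokers // 3
--     if n_triples > 1:
--         return [('m3oak-%d' % (n_triples,), 10 + 2 * n_triples)]
--     return []
-- ===== SOURCE B (Python) =====
-- def _check_multi3oak(hand):
--     rs = sorted(x[0] for x in hand if x[0] != 'O')
--     n_jokers = len(hand) - len(rs)   # every dropped card was a joker
--     n_triples = 0
--     n_singletons = 0
--     i, n = 0, len(rs)
--     while i < n:
--         j = i + 1
--         while j < n and rs[j] == rs[i]:
--             j += 1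
--         run = j - i
--         if run == 3:
--             n_triples += 1
--         elif run == 2 and n_jokers >= 1:
--             n_jokers -= 1
--             n_triples += 1
--         elif run == 1:
--             n_singletons += 1
--         i = j
--     k = min(n_singletons, n_jokers // 2)
--     n_jokers -= 2 * k
--     n_triples += k + n_jokers // 3
--     if n_triples > 1:
--         return [('m3oak-%d' % (n_triples,), 10 + 2 * n_triples)]
--     return []
-- ===== Notes on version B (the rewrite author's own statement) =====
-- stated objective: alternative
-- what changed: Instead of a Counter plus most_common() plus three filtering comprehensions, B sorts the non-joker rank characters and makes a single run-length scan over the sorted list, counting exact-3 runs and greedily spending one joker per pair-run during the scan; only the singleton and leftover-joker arithmetic remains after the scan.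
import Mathlib
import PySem

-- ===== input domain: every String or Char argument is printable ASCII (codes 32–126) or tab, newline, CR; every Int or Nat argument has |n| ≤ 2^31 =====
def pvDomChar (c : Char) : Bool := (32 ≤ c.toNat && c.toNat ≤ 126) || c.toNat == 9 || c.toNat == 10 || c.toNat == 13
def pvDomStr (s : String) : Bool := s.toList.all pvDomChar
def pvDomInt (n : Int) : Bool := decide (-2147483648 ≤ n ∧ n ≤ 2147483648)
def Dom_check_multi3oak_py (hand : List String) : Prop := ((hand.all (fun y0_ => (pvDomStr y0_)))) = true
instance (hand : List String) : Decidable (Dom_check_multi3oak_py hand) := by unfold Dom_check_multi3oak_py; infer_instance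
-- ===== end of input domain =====

-- B replaces Counter + most_common() + three filtering comprehensions by sorting the
-- non-joker ranks and a single run-length scan that counts exact-3 runs and greedily
-- spends one joker per pair-run during the scan (objective: alternative).


-- ===== PORT A =====
-- x[0]: Pre_ guarantees every string is nonempty, so the ' ' default is never used
def pvHead (x : String) : Char := (PySem.Str.pyGet? x 0).getD ' '

def check_multi3oak_py (hand : List String) : List (String × Int) :=
  let ranks : PySem.Dict Char Int := PySem.Dict.counter (hand.map pvHead)
  let n_jokers : Int := ranks.getD 'O' 0
  let ranks := ranks.erase 'O'          -- Counter.__delitem__: no KeyError when absent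
  let most_common := PySem.List.sorted ranks.items (fun p => p.2) true
  let n_triples : Int := (((most_common.filter (fun p => p.2 == 3)).map (·.1)).length : Int)
  let n_pairs : Int := (((most_common.filter (fun p => p.2 == 2)).map (·.1)).length : Int)
  let n_singletons : Int := (((most_common.filter (fun p => p.2 == 1)).map (·.1)).length : Int)
  let joker_triples_from_pairs := min n_pairs n_jokers
  let n_jokers := n_jokers - joker_triples_from_pairs
  let joker_triples_from_singletons := min n_singletons (PySem.Int.floordiv n_jokers 2)
  let n_jokers := n_jokers - 2 * joker_triples_from_singletons
  let n_triples := n_triples + joker_triples_from_pairs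
  let n_triples := n_triples + joker_triples_from_singletons
  let n_triples := n_triples + PySem.Int.floordiv n_jokers 3
  if n_triples > 1 then [("m3oak-" ++ PySem.Int.toStr n_triples, 10 + 2 * n_triples)] else []

-- ===== PORT B =====
-- B's outer while loop over the sorted rank list: each step consumes one maximal run
-- (the inner `while rs[j] == rs[i]: j += 1` is the takeWhile/dropWhile split) and
-- updates the accumulators (n_triples, n_jokers, n_singletons) exactly as Source B does.
def pvScan : List Char → Int → Int → Int → Int × Int × Int
  | [], t, jk, s => (t, jk, s)
  | c :: rest, t, jk, s =>
      let run : Int := ((rest.takeWhile (fun d => d == c)).length : Int) + 1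
      let rest' := rest.dropWhile (fun d => d == c)
      if run == 3 then pvScan rest' (t + 1) jk s
      else if run == 2 && decide (1 ≤ jk) then pvScan rest' (t + 1) (jk - 1) s
      else if run == 1 then pvScan rest' t jk (s + 1)
      else pvScan rest' t jk s
termination_by l _ _ _ => l.length
decreasing_by all_goals
  (have h := List.length_dropWhile_le (fun d => d == c) rest; simp only [List.length_cons]; omega)

def check_multi3oak_py_alt (hand : List String) : List (String × Int) :=
  let rs := PySem.List.sorted ((hand.map pvHead).filter (fun c => !(c == 'O'))) (fun c => c) false
  let n_jokers : Int := (hand.length : Int) - (rs.length : Int)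
  let (n_triples, n_jokers, n_singletons) := pvScan rs 0 n_jokers 0
  let k := min n_singletons (PySem.Int.floordiv n_jokers 2)
  let n_jokers := n_jokers - 2 * k
  let n_triples := n_triples + k + PySem.Int.floordiv n_jokers 3
  if n_triples > 1 then [("m3oak-" ++ PySem.Int.toStr n_triples, 10 + 2 * n_triples)] else []

-- ===== PRECONDITION & SPEC =====
-- Pre_ excludes hands containing an empty string, on which A raises IndexError at x[0].
def Pre_check_multi3oak_py (hand : List String) : Prop := ∀ x ∈ hand, x ≠ ""
instance (hand : List String) : Decidable (Pre_check_multi3oak_py hand) := by unfold Pre_check_multi3oak_py; infer_instance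
def pvWitness_check_multi3oak_py : List String := ["Ox", "2a", "2b", "2c"]

def Spec_check_multi3oak_py (hand : List String) (out : List (String × Int)) : Prop := out = check_multi3oak_py_alt hand
instance (hand : List String) (out : List (String × Int)) : Decidable (Spec_check_multi3oak_py hand out) := by unfold Spec_check_multi3oak_py; infer_instance

-- ===== CLAIM (what is proved, stated in full; the proofs are below) =====
def Claim_equal_check_multi3oak_py : Prop := ∀ (hand : List String), Dom_check_multi3oak_py hand → Pre_check_multi3oak_py hand → Spec_check_multi3oak_py hand (check_multi3oak_py hand)

-- ===== LEMMAS AND PROOFS =====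

-- number of distinct elements of l whose multiplicity in l is ki
def pvN (l : List Char) (ki : Int) : Int :=
  ((PySem.List.dedup l).countP (fun x => (l.count x : Int) == ki) : Int)

-- two nodup lists filtered by pointwise-equivalent predicates have equal countP
theorem pv_countP_tool {l₁ l₂ : List Char} {p q : Char → Bool}
    (h₁ : l₁.Nodup) (h₂ : l₂.Nodup)
    (h : ∀ x, (x ∈ l₁ ∧ p x = true) ↔ (x ∈ l₂ ∧ q x = true)) :
    l₁.countP p = l₂.countP q := by
  rw [List.countP_eq_length_filter, List.countP_eq_length_filter]
  refine List.Perm.length_eq ?_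
  rw [List.perm_ext_iff_of_nodup (h₁.filter p) (h₂.filter q)]
  intro a; simp only [List.mem_filter]; exact h a

theorem pvN_nonneg (l : List Char) (ki : Int) : 0 ≤ pvN l ki := by
  unfold pvN; positivity

theorem pvN_perm {l₁ l₂ : List Char} (h : l₁.Perm l₂) (ki : Int) : pvN l₁ ki = pvN l₂ ki := by
  unfold pvN
  congr 1
  refine pv_countP_tool (PySem.List.nodup_dedup l₁) (PySem.List.nodup_dedup l₂) ?_
  intro x
  simp only [PySem.List.mem_dedup, h.mem_iff, h.count_eq]

-- a sorted tail has no further copies of the head after dropWhile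
theorem pv_notMem_dropWhile (c : Char) (rest : List Char)
    (h1 : ∀ x ∈ rest, c ≤ x) (h2 : rest.Pairwise (· ≤ ·)) :
    c ∉ rest.dropWhile (fun d => d == c) := by
  induction rest with
  | nil => simp
  | cons d rs ih =>
    by_cases hd : d = c
    · subst hd
      simp only [List.dropWhile_cons, BEq.rfl]
      exact ih (fun x hx => h1 x (List.mem_cons_of_mem _ hx)) h2.of_cons
    · have hcd : c < d := lt_of_le_of_ne (h1 d (List.mem_cons_self)) (Ne.symm hd)
      simp only [List.dropWhile_cons, beq_iff_eq, if_neg hd]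
      intro hmem
      rcases List.mem_cons.1 hmem with h | h
      · exact absurd h.symm hd
      · have : d ≤ c := (List.pairwise_cons.1 h2).1 c h
        exact absurd (lt_of_lt_of_le hcd this) (lt_irrefl c)

-- decomposition of pvN over the first maximal run of a sorted list
theorem pvN_cons (c : Char) (rest : List Char) (ki : Int)
    (hs : (c :: rest).Pairwise (· ≤ ·)) :
    pvN (c :: rest) ki =
      (if (((rest.takeWhile (fun d => d == c)).length : Int) + 1) == ki then 1 else 0)
        + pvN (rest.dropWhile (fun d => d == c)) ki := by
  obtain ⟨hle, hp⟩ := List.pairwise_cons.1 hs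
  set tw := rest.takeWhile (fun d => d == c) with htw
  set rest' := rest.dropWhile (fun d => d == c) with hrest'
  have hsplit : tw ++ rest' = rest := List.takeWhile_append_dropWhile
  have htwc : ∀ x ∈ tw, x = c := by
    intro x hx
    have := List.mem_takeWhile_imp hx
    exact beq_iff_eq.1 this
  have hnot : c ∉ rest' := pv_notMem_dropWhile c rest hle hp
  have hcount_c : (c :: rest).count c = tw.length + 1 := by
    rw [List.count_cons_self, ← hsplit, List.count_append]
    rw [List.count_eq_length.2 (fun b hb => (htwc b hb).symm), List.count_eq_zero.2 hnot]
  have hcount_ne : ∀ x, x ≠ c → (c :: rest).count x = rest'.count x := by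
    intro x hx
    rw [← hsplit]
    simp [List.count_append, Ne.symm hx,
      List.count_eq_zero.2 (fun hmem => hx (htwc x hmem))]
  have hmem_iff : ∀ x, x ∈ c :: rest ↔ x ∈ c :: rest' := by
    intro x
    simp only [List.mem_cons, ← hsplit, List.mem_append]
    constructor
    · rintro (h | h | h)
      · exact Or.inl h
      · exact Or.inl (htwc x h)
      · exact Or.inr h
    · rintro (h | h)
      · exact Or.inl h
      · exact Or.inr (Or.inr h)
  have hnodup_cons : (c :: PySem.List.dedup rest').Nodup := by
    refine List.nodup_cons.2 ⟨?_, PySem.List.nodup_dedup rest'⟩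
    rw [PySem.List.mem_dedup]; exact hnot
  have step1 : (PySem.List.dedup (c :: rest)).countP (fun x => ((c :: rest).count x : Int) == ki)
      = (c :: PySem.List.dedup rest').countP (fun x => ((c :: rest).count x : Int) == ki) := by
    refine pv_countP_tool (PySem.List.nodup_dedup _) hnodup_cons ?_
    intro x
    have hm : x = c ∨ x ∈ rest ↔ x = c ∨ x ∈ rest' := by
      simpa [List.mem_cons] using hmem_iff x
    simp only [PySem.List.mem_dedup, List.mem_cons]
    tauto
  have step3 : (PySem.List.dedup rest').countP (fun x => ((c :: rest).count x : Int) == ki)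
      = (PySem.List.dedup rest').countP (fun x => (rest'.count x : Int) == ki) := by
    refine List.countP_congr ?_
    intro x hx
    have hxne : x ≠ c := by
      intro h; subst h; exact hnot ((PySem.List.mem_dedup _ _).1 hx)
    rw [hcount_ne x hxne]
  unfold pvN
  rw [step1, List.countP_cons, step3, hcount_c]
  push_cast
  split_ifs <;> omega

-- the run-length scan on a sorted list computes the exact-3 count, the greedy
-- pair allocation min(n_pairs, jk), and the singleton count
theorem pvScan_eq (l : List Char) (t jk s : Int) :
    l.Pairwise (· ≤ ·) → 0 ≤ jk →
    pvScan l t jk s = (t + pvN l 3 + min (pvN l 2) jk,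
                       jk - min (pvN l 2) jk,
                       s + pvN l 1) := by
  fun_induction pvScan l t jk s with
  | case1 t jk s =>
    intro _ hjk
    have h0 : ∀ ki : Int, pvN [] ki = 0 := fun _ => rfl
    simp [h0, min_eq_left hjk]
  | case2 c rest t jk s run rest' hrun ih =>
    intro hs hjk
    have htail : rest'.Pairwise (· ≤ ·) :=
      (List.pairwise_cons.1 hs).2.sublist (List.dropWhile_sublist _)
    have hN := fun ki => pvN_cons c rest ki hs
    have hrun3 : run = 3 := by simpa using hrun
    rw [ih htail hjk]
    have h2 := pvN_nonneg rest' 2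
    have e3 := hN 3; have e2 := hN 2; have e1 := hN 1
    rw [show ((rest.takeWhile (fun d => d == c)).length : Int) + 1 = run from rfl] at e3 e2 e1
    rw [hrun3] at e3 e2 e1
    simp only [show rest.dropWhile (fun d => d == c) = rest' from rfl] at e3 e2 e1
    simp only [Prod.mk.injEq]
    norm_num at e3 e2 e1
    refine ⟨by omega, by omega, by omega⟩
  | case3 c rest t jk s run rest' hrun hcond ih =>
    intro hs hjk
    have htail : rest'.Pairwise (· ≤ ·) :=
      (List.pairwise_cons.1 hs).2.sublist (List.dropWhile_sublist _)
    have hN := fun ki => pvN_cons c rest ki hs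
    obtain ⟨hrun2, hjk1⟩ : run = 2 ∧ 1 ≤ jk := by
      have hc := hcond
      rw [Bool.and_eq_true] at hc
      exact ⟨by simpa using hc.1, by simpa using hc.2⟩
    rw [ih htail (by omega)]
    have h2 := pvN_nonneg rest' 2
    have e3 := hN 3; have e2 := hN 2; have e1 := hN 1
    rw [show ((rest.takeWhile (fun d => d == c)).length : Int) + 1 = run from rfl] at e3 e2 e1
    rw [hrun2] at e3 e2 e1
    simp only [show rest.dropWhile (fun d => d == c) = rest' from rfl] at e3 e2 e1
    simp only [Prod.mk.injEq]
    norm_num at e3 e2 e1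
    refine ⟨by omega, by omega, by omega⟩
  | case4 c rest t jk s run rest' hrun hcond hrun1 ih =>
    intro hs hjk
    have htail : rest'.Pairwise (· ≤ ·) :=
      (List.pairwise_cons.1 hs).2.sublist (List.dropWhile_sublist _)
    have hN := fun ki => pvN_cons c rest ki hs
    have hr1 : run = 1 := by simpa using hrun1
    rw [ih htail hjk]
    have e3 := hN 3; have e2 := hN 2; have e1 := hN 1
    rw [show ((rest.takeWhile (fun d => d == c)).length : Int) + 1 = run from rfl] at e3 e2 e1
    rw [hr1] at e3 e2 e1
    simp only [show rest.dropWhile (fun d => d == c) = rest' from rfl] at e3 e2 e1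
    simp only [Prod.mk.injEq]
    norm_num at e3 e2 e1
    refine ⟨by omega, by omega, by omega⟩
  | case5 c rest t jk s run rest' hrun hcond hrun1 ih =>
    intro hs hjk
    have htail : rest'.Pairwise (· ≤ ·) :=
      (List.pairwise_cons.1 hs).2.sublist (List.dropWhile_sublist _)
    have hN := fun ki => pvN_cons c rest ki hs
    have hnot3 : run ≠ 3 := by simpa using hrun
    have hnot1 : run ≠ 1 := by simpa using hrun1
    have hrunpos : 1 ≤ run := by
      show (1 : Int) ≤ ((rest.takeWhile (fun d => d == c)).length : Int) + 1
      omega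
    rw [ih htail hjk]
    have h2 := pvN_nonneg rest' 2
    have e3 := hN 3; have e2 := hN 2; have e1 := hN 1
    rw [show ((rest.takeWhile (fun d => d == c)).length : Int) + 1 = run from rfl] at e3 e2 e1
    simp only [show rest.dropWhile (fun d => d == c) = rest' from rfl] at e3 e2 e1
    by_cases hrun2 : run = 2
    · -- run == 2 but no joker available: jk = 0
      have hjk0 : jk = 0 := by
        by_contra h
        have : (run == 2 && decide (1 ≤ jk)) = true := by
          simp [hrun2]; omega
        rw [this] at hcond; exact absurd rfl hcond
      rw [hrun2] at e3 e2 e1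
      simp only [Prod.mk.injEq]
      norm_num at e3 e2 e1
      refine ⟨by omega, by omega, by omega⟩
    · have : ∀ k : Int, k = 3 ∨ k = 2 ∨ k = 1 → (run == k) = false := by
        intro k hk
        rcases hk with h | h | h <;> subst h <;> simp [hnot3, hrun2, hnot1]
      rw [this 3 (by omega)] at e3; rw [this 2 (by omega)] at e2; rw [this 1 (by omega)] at e1
      simp only [Prod.mk.injEq]
      norm_num at e3 e2 e1
      refine ⟨by omega, by omega, by omega⟩

-- A's length-of-filtered-comprehension over most_common equals pvN of the joker-free
-- rank list (the distinct-element multiplicity count)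
theorem pv_A_nk (cs : List Char) (ki : Int) :
    ((((PySem.List.sorted ((PySem.Dict.counter cs).erase 'O').items (fun p => p.2) true).filter
        (fun p => p.2 == ki)).map (·.1)).length : Int)
      = pvN (cs.filter (fun c => !(c == 'O'))) ki := by
  rw [List.length_map, ← List.countP_eq_length_filter]
  rw [(PySem.List.sorted_perm (xs := ((PySem.Dict.counter cs).erase 'O').items)
        (key := fun p => p.2) (rev := true)).countP_eq]
  show (((PySem.Dict.counter cs).erase 'O').items.countP (fun p => p.2 == ki) : Int) = _
  rw [show ((PySem.Dict.counter cs).erase 'O').items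
      = (PySem.Dict.counter cs).items.filter (fun p => !(p.1 == 'O')) from rfl]
  rw [PySem.Dict.items_counter, List.countP_filter, List.countP_map]
  unfold pvN
  congr 1
  refine pv_countP_tool ?_ (PySem.List.nodup_dedup _) ?_
  · rw [← PySem.List.dedup_eq_ofList]; exact PySem.List.nodup_dedup cs
  · intro x
    by_cases hx : x = 'O'
    · subst hx
      simp [← PySem.List.dedup_eq_ofList, PySem.List.mem_dedup, List.mem_filter]
    · simp [hx, List.count_filter, ← PySem.List.dedup_eq_ofList, PySem.List.mem_dedup,
        List.mem_filter, Function.comp]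

-- the joker count: length difference of hand and the filtered rank list
theorem pv_jokers (cs : List Char) :
    (cs.length : Int) - ((cs.filter (fun c => !(c == 'O'))).length : Int) = (cs.count 'O' : Int) := by
  induction cs with
  | nil => simp
  | cons c cs ih =>
    by_cases hc : c = 'O'
    · subst hc
      simp only [List.filter_cons, List.count_cons, List.length_cons]
      norm_num
      omega
    · simp only [List.filter_cons, List.count_cons, List.length_cons]
      rw [if_pos (by simp [hc]), if_neg (by simp [hc])]
      simp only [List.length_cons]
      push_cast
      omega

-- ===== VERDICT (by name: the statement is the Claim_ definition above) =====
theorem check_multi3oak_py_spec : Claim_equal_check_multi3oak_py := by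
  intro hand _ _
  unfold Spec_check_multi3oak_py check_multi3oak_py check_multi3oak_py_alt
  set cs := hand.map pvHead with hcs
  set fs := cs.filter (fun c => !(c == 'O')) with hfs
  set rs := PySem.List.sorted fs (fun c => c) false with hrs
  have hlen : (hand.length : Int) - (rs.length : Int) = (cs.count 'O' : Int) := by
    rw [hrs, PySem.List.length_sorted, ← pv_jokers cs, hcs, List.length_map]
  have hsorted : rs.Pairwise (· ≤ ·) := PySem.List.sorted_pairwise (xs := fs) (key := fun c => c)
  have hperm : rs.Perm fs := by rw [hrs]; exact PySem.List.sorted_perm _ _ _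
  have hscan := pvScan_eq rs 0 ((hand.length : Int) - (rs.length : Int)) 0 hsorted
    (by rw [hlen]; exact Int.natCast_nonneg _)
  rw [hlen] at hscan
  have hNk : ∀ ki : Int, pvN rs ki = pvN fs ki := fun ki => pvN_perm hperm ki
  simp only [PySem.Dict.getD_counter, pv_A_nk]
  simp only [← hfs]
  rw [hlen]
  simp only [hscan, hNk]
  norm_num
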